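-- pv_equiv track=rewrite | github.com/Alexander-Berg/2022-tests-examples-2 | Taxi/tests_yaga_adjust/test_adjust_track.py | _find_interpolation_candidates
-- ===== SOURCE A (Python) =====
-- def _find_interpolation_candidates(adjusted_track):
--     """
--     Returns list of indices of poinst that should be interpolated
--     """
--
--     left_end = None
--
--     # Null points that has real point on the left, but may or may not
--     # have real point on the right. When real point on the right
--     # is found, null_candidaets is merged into result
--     null_candidates = []
--     # (left, index, right) of the null points that has real point on
--     # the left and right side
--     result = []
--
--     for pos, val in enumerate(adjusted_track):
--         if val['is_null'] is False:
--             for x in null_candidates: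
--                 result.append((left_end, x, pos))
--             left_end = pos
--             null_candidates = []
--             continue
--
--         # This is null point
--
--         # If there is real point on the left, add to candidates
--         if left_end is not None:
--             null_candidates.append(pos)
--
--     return result
-- ===== SOURCE B (Python) =====
-- def _find_interpolation_candidates(adjusted_track):
--     """
--     Returns list of indices of poinst that should be interpolated
--     """
--     # Pass 1: indices of real (non-null) points, in order.
--     reals = [pos for pos, val in enumerate(adjusted_track)
--              if val['is_null'] is False]
--     # Pass 2: every gap between consecutive real points is interpolable.
--     result = []
--     for left, right in zip(reals, reals[1:]):
--         for pos in range(left + 1, right):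
--             result.append((left, pos, right))
--     return result
-- ===== Notes on version B (the rewrite author's own statement) =====
-- stated objective: simpler
-- what changed: Replaces A's running left_end/null_candidates buffer-and-flush state machine with a two-phase decomposition: first collect the indices of real points, then emit every index strictly between each consecutive pair of reals.
import Mathlib
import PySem

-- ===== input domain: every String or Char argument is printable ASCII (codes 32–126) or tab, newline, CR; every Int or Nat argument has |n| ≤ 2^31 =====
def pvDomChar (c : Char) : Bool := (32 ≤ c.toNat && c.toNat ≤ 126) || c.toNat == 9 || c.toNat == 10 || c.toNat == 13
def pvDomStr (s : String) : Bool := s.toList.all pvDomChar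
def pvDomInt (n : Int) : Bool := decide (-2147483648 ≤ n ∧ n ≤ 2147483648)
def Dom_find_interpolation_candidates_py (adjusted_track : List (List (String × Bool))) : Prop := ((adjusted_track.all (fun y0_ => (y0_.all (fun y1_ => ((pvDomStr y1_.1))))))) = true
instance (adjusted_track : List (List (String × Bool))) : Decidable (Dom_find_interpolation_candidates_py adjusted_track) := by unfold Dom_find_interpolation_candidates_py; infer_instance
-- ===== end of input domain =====

-- B replaces A's running left_end/null_candidates buffer-and-flush with a two-phase
-- index-then-gap-scan decomposition (objective: simpler); same return value on Pre_.


-- ===== PORT A =====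
-- val['is_null'] with the key present (Pre_ guarantees this); the default `true` is never
-- read inside Pre_.
def pvLookNull (val : List (String × Bool)) : Bool :=
  PySem.Dict.getD (PySem.Dict.mk val) "is_null" true

-- loop body of A: state = (left_end, null_candidates, result).  In the real branch the
-- tuple's first component is Python's `left_end` variable; it is only read via `.getD 0`
-- when null_candidates is nonempty, in which case left_end is `some l` in Python too.
def pvStepA (st : Option Int × List Int × List (Int × Int × Int))
    (pv : Int × List (String × Bool)) : Option Int × List Int × List (Int × Int × Int) :=
  if pvLookNull pv.2 = false then
    (some pv.1, [], st.2.2 ++ st.2.1.map (fun x => (st.1.getD 0, x, pv.1)))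
  else
    match st.1 with
    | some _ => (st.1, st.2.1 ++ [pv.1], st.2.2)
    | none => st

def find_interpolation_candidates_py (adjusted_track : List (List (String × Bool))) : List (Int × Int × Int) :=
  ((PySem.List.enumerate adjusted_track 0).foldl pvStepA (none, [], [])).2.2

-- ===== PORT B =====
-- inner loop of B: append (left, pos, right) for pos in range(left+1, right)
def pvStepB (res : List (Int × Int × Int)) (lr : Int × Int) : List (Int × Int × Int) :=
  res ++ (PySem.List.pyRange (lr.1 + 1) lr.2 1).map (fun pos => (lr.1, pos, lr.2))

def find_interpolation_candidates_py_alt (adjusted_track : List (List (String × Bool))) : List (Int × Int × Int) :=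
  let reals := ((PySem.List.enumerate adjusted_track 0).filter
    (fun pv => pvLookNull pv.2 == false)).map (fun pv => pv.1)
  (reals.zip reals.tail).foldl pvStepB []

-- ===== PRECONDITION & SPEC =====
-- Pre_ excludes exactly the inputs where Python A raises KeyError: an element without the
-- key 'is_null' (B raises the same exception there).
def Pre_find_interpolation_candidates_py (adjusted_track : List (List (String × Bool))) : Prop :=
  ∀ val ∈ adjusted_track, ((PySem.Dict.mk val).get? "is_null").isSome = true
instance (adjusted_track : List (List (String × Bool))) : Decidable (Pre_find_interpolation_candidates_py adjusted_track) := by unfold Pre_find_interpolation_candidates_py; infer_instance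

def pvWitness_find_interpolation_candidates_py : (List (List (String × Bool))) :=
  [[("is_null", false)], [("is_null", true)], [("is_null", true)], [("is_null", false)]]

def Spec_find_interpolation_candidates_py (adjusted_track : List (List (String × Bool))) (out : List (Int × Int × Int)) : Prop := out = find_interpolation_candidates_py_alt adjusted_track
instance (adjusted_track : List (List (String × Bool))) (out : List (Int × Int × Int)) : Decidable (Spec_find_interpolation_candidates_py adjusted_track out) := by unfold Spec_find_interpolation_candidates_py; infer_instance

-- ===== CLAIM (what is proved, stated in full; the proofs are below) =====
def Claim_equal_find_interpolation_candidates_py : Prop := ∀ (adjusted_track : List (List (String × Bool))), Dom_find_interpolation_candidates_py adjusted_track → Pre_find_interpolation_candidates_py adjusted_track → Spec_find_interpolation_candidates_py adjusted_track (find_interpolation_candidates_py adjusted_track)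

-- ===== LEMMAS AND PROOFS =====

-- the gap triples emitted between consecutive real indices
def pvPairs : List Int → List (Int × Int × Int)
  | a :: b :: rest =>
      (PySem.List.pyRange (a + 1) b 1).map (fun p => (a, p, b)) ++ pvPairs (b :: rest)
  | _ => []

-- indices of the real points of ts, enumeration starting at i
def pvReals (ts : List (List (String × Bool))) (i : Int) : List Int :=
  ((PySem.List.enumerate ts i).filter (fun pv => pvLookNull pv.2 == false)).map (fun pv => pv.1)

theorem pvReals_nil (i : Int) : pvReals [] i = [] := rfl

theorem pvReals_cons (v : List (String × Bool)) (ts : List (List (String × Bool))) (i : Int) :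
    pvReals (v :: ts) i =
      if pvLookNull v = false then i :: pvReals ts (i + 1) else pvReals ts (i + 1) := by
  simp only [pvReals, PySem.List.enumerate_cons, List.filter_cons]
  by_cases h : pvLookNull v = false <;> simp [h]

-- B's fold over the zipped consecutive pairs computes pvPairs
theorem pvFoldB (rs : List Int) (acc : List (Int × Int × Int)) :
    (rs.zip rs.tail).foldl pvStepB acc = acc ++ pvPairs rs := by
  induction rs generalizing acc with
  | nil => simp [pvPairs]
  | cons a rest ih =>
      cases rest with
      | nil => simp [pvPairs]
      | cons b rest' =>
          simp only [List.tail_cons, List.zip_cons_cons, List.foldl_cons]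
          have h := ih (pvStepB acc (a, b))
          simp only [List.tail_cons] at h
          rw [h]
          simp [pvStepB, pvPairs]

-- A's fold, once a real left end l exists and the current candidates are exactly
-- the (all-null) indices l+1 .. i-1
theorem pvFoldA_some (ts : List (List (String × Bool))) (i l : Int)
    (res : List (Int × Int × Int)) (h : l < i) :
    ((PySem.List.enumerate ts i).foldl pvStepA
        (some l, PySem.List.pyRange (l + 1) i 1, res)).2.2
      = res ++ pvPairs (l :: pvReals ts i) := by
  induction ts generalizing i l res with
  | nil => simp [pvReals_nil, pvPairs]
  | cons v ts ih =>
      rw [PySem.List.enumerate_cons, List.foldl_cons, pvReals_cons]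
      by_cases hv : pvLookNull v = false
      · simp only [hv, if_true, pvStepA]
        have h0 : PySem.List.pyRange (i + 1) (i + 1) 1 = [] :=
          PySem.List.pyRange_one_eq_nil le_rfl
        have := ih (i + 1) i
          (res ++ (PySem.List.pyRange (l + 1) i 1).map (fun x => (l, x, i)))
          (by omega)
        rw [h0] at this
        simp only [Option.getD_some] at this ⊢
        rw [this, pvPairs]
        simp
      · simp only [hv, pvStepA]
        have hstep : PySem.List.pyRange (l + 1) i 1 ++ [i]
            = PySem.List.pyRange (l + 1) (i + 1) 1 :=
          (PySem.List.pyRange_one_succ_right (by omega)).symm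
        rw [hstep]
        exact ih (i + 1) l res (by omega)

-- A's fold before any real point has been seen
theorem pvFoldA_none (ts : List (List (String × Bool))) (i : Int)
    (res : List (Int × Int × Int)) :
    ((PySem.List.enumerate ts i).foldl pvStepA (none, [], res)).2.2
      = res ++ pvPairs (pvReals ts i) := by
  induction ts generalizing i res with
  | nil => simp [pvReals_nil, pvPairs]
  | cons v ts ih =>
      rw [PySem.List.enumerate_cons, List.foldl_cons, pvReals_cons]
      by_cases hv : pvLookNull v = false
      · simp only [hv, if_true, pvStepA]
        have h0 : ([] : List Int) = PySem.List.pyRange (i + 1) (i + 1) 1 :=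
          (PySem.List.pyRange_one_eq_nil le_rfl).symm
        simp only [List.map_nil, List.append_nil]
        rw [h0, pvFoldA_some ts (i + 1) i res (by omega)]
      · simp only [hv, pvStepA]
        exact ih (i + 1) res

-- ===== VERDICT (by name: the statement is the Claim_ definition above) =====
theorem find_interpolation_candidates_py_spec : Claim_equal_find_interpolation_candidates_py := by
  intro t _ _
  show find_interpolation_candidates_py t = find_interpolation_candidates_py_alt t
  rw [find_interpolation_candidates_py, find_interpolation_candidates_py_alt]
  rw [pvFoldA_none t 0 []]
  rw [pvFoldB]
  rfl
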